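-- pv_equiv track=rewrite | github.com/Benitochall/lc150 | algos/from collections import deque.py | max_submatrix_sums
-- ===== SOURCE A (Python) =====
-- from collections import deque
--
-- def max_submatrix_sums(matrix):
--     m = len(matrix)
--     if m == 0:
--         return []
--
--     # Step 1: Compute the prefix sum matrix
--     prefix_sum = [[0] * (m + 1) for _ in range(m + 1)]
--     for i in range(1, m + 1):
--         for j in range(1, m + 1):
--             prefix_sum[i][j] = matrix[i-1][j-1] + prefix_sum[i-1][j] + prefix_sum[i][j-1] - prefix_sum[i-1][j-1]
--
--     # Step 2: Calculate the maximum sum for each n x n submatrix using sliding window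
--     max_sums = []
--     for n in range(1, m + 1):
--         max_sum = float('-inf')
--         for i in range(n, m + 1):
--             row_sums = [0] * (m + 1)
--             for j in range(1, m + 1):
--                 row_sums[j] = prefix_sum[i][j] - prefix_sum[i-n][j]
--
--             # Use deque to find the maximum sum in the sliding window
--             deq = deque()
--             for j in range(1, m + 1):
--                 while deq and deq[0] < j - n + 1:
--                     deq.popleft()
--
--                 while deq and row_sums[deq[-1]] <= row_sums[j]:
--                     deq.pop()
--
--                 deq.append(j)
--
--                 if j >= n:
--                     total = row_sums[deq[0]] - (prefix_sum[i][j-n] - prefix_sum[i-n][j-n])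
--                     max_sum = max(max_sum, total)
--
--         max_sums.append(max_sum)
--
--     return max_sums
-- ===== SOURCE B (Python) =====
-- def max_submatrix_sums(matrix):
--     m = len(matrix)
--     if m == 0:
--         return []
--     # 2D prefix-sum table, each row built from a running row sum plus the row above
--     pref = [[0] * (m + 1)]
--     for r in matrix:
--         prev = pref[-1]
--         row = [0]
--         s = 0
--         for j in range(m):
--             s += r[j]
--             row.append(s + prev[j + 1])
--         pref.append(row)
--     result = []
--     for n in range(1, m + 1):
--         best = None
--         for i in range(n, m + 1):
--             # column-prefix sums of the height-n band ending at row i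
--             band = [pref[i][c] - pref[i - n][c] for c in range(m + 1)]
--             for j in range(n, m + 1):
--                 # window maximum taken with a plain slice max
--                 s = max(band[j - n + 1 : j + 1]) - band[j - n]
--                 if best is None or s > best:
--                     best = s
--         result.append(best)
--     return result
-- ===== Notes on version B (the rewrite author's own statement) =====
-- stated objective: simpler
-- what changed: The monotonic-deque sliding-window machinery is removed: each window maximum over the band's column-prefix sums is taken with a plain slice max, the prefix table is built by running row sums instead of the four-term cell recurrence, and the running best uses a None accumulator instead of float('-inf').
import Mathlib
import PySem

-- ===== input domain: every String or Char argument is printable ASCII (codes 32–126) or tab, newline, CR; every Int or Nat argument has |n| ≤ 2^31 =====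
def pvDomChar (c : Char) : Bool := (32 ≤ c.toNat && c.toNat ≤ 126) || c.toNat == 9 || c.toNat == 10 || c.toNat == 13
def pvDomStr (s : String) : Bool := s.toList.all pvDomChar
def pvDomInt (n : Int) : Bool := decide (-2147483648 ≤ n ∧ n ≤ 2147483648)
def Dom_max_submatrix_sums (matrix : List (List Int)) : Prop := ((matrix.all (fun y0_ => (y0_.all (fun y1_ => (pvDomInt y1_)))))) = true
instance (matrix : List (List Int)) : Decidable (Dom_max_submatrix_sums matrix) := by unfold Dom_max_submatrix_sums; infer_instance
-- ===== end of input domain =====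

-- B replaces A's monotonic-deque sliding-window machinery by a plain slice max per window and
-- builds the prefix table by running row sums (simpler, not faster).

-- shared 2D indexing helper: M[a][b] with Python index semantics, defaulted (Pre_ keeps indices in range)
def idx2 (M : List (List Int)) (a b : Int) : Int :=
  (PySem.List.pyGet? ((PySem.List.pyGet? M a).getD []) b).getD 0

-- ===== PORT A =====
-- max(max_sum, t) where max_sum starts as float('-inf'): none models -inf (always overwritten)
def pymaxO (a : Option Int) (x : Int) : Option Int :=
  match a with
  | none => some x
  | some v => some (max v x)

-- Step 1 of A: the prefix-sum table, a finite map filled cell by cell by the double loop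
def psA (M : List (List Int)) (m : Int) : Int → Int → Int :=
  (PySem.List.pyRange 1 (m+1) 1).foldl (fun ps i =>
    (PySem.List.pyRange 1 (m+1) 1).foldl (fun ps j =>
      fun a b =>
        if a = i ∧ b = j then
          idx2 M (i-1) (j-1) + ps (i-1) j + ps i (j-1) - ps (i-1) (j-1)
        else ps a b) ps)
    (fun _ _ => 0)

-- row_sums array of A, a map filled by the j loop
def rsA (ps : Int → Int → Int) (n i m : Int) : Int → Int :=
  (PySem.List.pyRange 1 (m+1) 1).foldl (fun rs j =>
    fun k => if k = j then ps i j - ps (i-n) j else rs k)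
    (fun _ => 0)

-- one iteration of A's deque loop body (popleft-while, pop-while, append, max update)
def dqStep (rs : Int → Int) (off : Int → Int) (n : Int)
    (st : List Int × Option Int) (j : Int) : List Int × Option Int :=
  let d1 := st.1.dropWhile (fun d => d < j - n + 1)
  let d2 := ((d1.reverse.dropWhile (fun d => rs d ≤ rs j)).reverse) ++ [j]
  (d2, if n ≤ j then pymaxO st.2 (rs (d2.headD 0) - off j) else st.2)

def max_submatrix_sums (matrix : List (List Int)) : List Int :=
  let m : Int := matrix.length
  if m = 0 then []
  else
    let ps := psA matrix m
    (PySem.List.pyRange 1 (m+1) 1).foldl (fun maxSums n =>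
      let acc : Option Int :=
        (PySem.List.pyRange n (m+1) 1).foldl (fun acc i =>
          let rs := rsA ps n i m
          ((PySem.List.pyRange 1 (m+1) 1).foldl
            (dqStep rs (fun j => ps i (j-n) - ps (i-n) (j-n)) n)
            ([], acc)).2)
          (none : Option Int)
      maxSums ++ [acc.getD 0]) []

-- ===== PORT B =====
-- inner row loop of B's prefix build: running sum s, row built left to right on top of prev
def rowFold (m : Int) (prev r : List Int) : List Int × Int :=
  (PySem.List.pyRange 0 m 1).foldl (fun (p : List Int × Int) j =>
    let s := p.2 + ((PySem.List.pyGet? r j).getD 0)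
    (p.1 ++ [s + ((PySem.List.pyGet? prev (j+1)).getD 0)], s))
    ([0], 0)

-- 'if best is None or s > best: best = s' of B
def bmax (b : Option Int) (s : Int) : Option Int :=
  match b with
  | none => some s
  | some v => if v < s then some s else some v

def max_submatrix_sums_alt (matrix : List (List Int)) : List Int :=
  let m : Int := matrix.length
  if m = 0 then []
  else
    let pref : List (List Int) :=
      matrix.foldl (fun pref r =>
        pref ++ [(rowFold m ((pref.getLast?).getD []) r).1])
        [List.replicate (m.toNat + 1) 0]
    (PySem.List.pyRange 1 (m+1) 1).foldl (fun res n =>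
      let best : Option Int :=
        (PySem.List.pyRange n (m+1) 1).foldl (fun b i =>
          let band := (PySem.List.pyRange 0 (m+1) 1).map
            (fun c => idx2 pref i c - idx2 pref (i-n) c)
          (PySem.List.pyRange n (m+1) 1).foldl (fun b j =>
            bmax b
              ((PySem.List.max? (PySem.List.slice band (some (j-n+1)) (some (j+1)))
                  (fun x => x)).getD 0
                - (PySem.List.pyGet? band (j-n)).getD 0)) b) none
      res ++ [best.getD 0]) []

-- ===== PRECONDITION & SPEC =====
-- Pre_ excludes exactly the ragged inputs (some row shorter than the number of rows) on which
-- the Python A raises IndexError (B raises there too).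
def Pre_max_submatrix_sums (matrix : List (List Int)) : Prop :=
  ∀ row ∈ matrix, matrix.length ≤ row.length
instance (matrix : List (List Int)) : Decidable (Pre_max_submatrix_sums matrix) := by
  unfold Pre_max_submatrix_sums; infer_instance
def pvWitness_max_submatrix_sums : List (List Int) := [[1, -2], [3, 4]]

def Spec_max_submatrix_sums (matrix : List (List Int)) (out : List Int) : Prop := out = max_submatrix_sums_alt matrix
instance (matrix : List (List Int)) (out : List Int) : Decidable (Spec_max_submatrix_sums matrix out) := by unfold Spec_max_submatrix_sums; infer_instance

-- ===== CLAIM (what is proved, stated in full; the proofs are below) =====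
def Claim_equal_max_submatrix_sums : Prop := ∀ (matrix : List (List Int)), Dom_max_submatrix_sums matrix → Pre_max_submatrix_sums matrix → Spec_max_submatrix_sums matrix (max_submatrix_sums matrix)

-- ===== LEMMAS AND PROOFS =====

-- the mathematical prefix sum both tables realise
def rowSum (M : List (List Int)) (a j : Int) : Int :=
  ((PySem.List.pyRange 0 j 1).map (fun b => idx2 M a b)).sum
def Pf (M : List (List Int)) (i j : Int) : Int :=
  ((PySem.List.pyRange 0 i 1).map (fun a => rowSum M a j)).sum

lemma Pf_zero_left (M : List (List Int)) (j : Int) : Pf M 0 j = 0 := by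
  simp [Pf, PySem.List.pyRange_one_eq_nil]

lemma rowSum_nonpos (M : List (List Int)) (a : Int) (j : Int) (h : j ≤ 0) : rowSum M a j = 0 := by
  simp [rowSum, PySem.List.pyRange_one_eq_nil h]

lemma Pf_zero_right (M : List (List Int)) (i : Int) : Pf M i 0 = 0 := by
  unfold Pf
  rw [List.map_congr_left (fun a _ => rowSum_nonpos M a 0 le_rfl)]
  simp

lemma rowSum_succ (M : List (List Int)) (a j : Int) (h : 1 ≤ j) :
    rowSum M a j = rowSum M a (j-1) + idx2 M a (j-1) := by
  obtain ⟨q, rfl⟩ : ∃ q, j = q + 1 := ⟨j - 1, by omega⟩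
  unfold rowSum
  rw [PySem.List.pyRange_one_succ_right (by omega : (0:Int) ≤ q)]
  simp

lemma Pf_succ (M : List (List Int)) (i j : Int) (h : 1 ≤ i) :
    Pf M i j = Pf M (i-1) j + rowSum M (i-1) j := by
  obtain ⟨q, rfl⟩ : ∃ q, i = q + 1 := ⟨i - 1, by omega⟩
  unfold Pf
  rw [PySem.List.pyRange_one_succ_right (by omega : (0:Int) ≤ q)]
  simp

lemma Pf_rec (M : List (List Int)) (i j : Int) (hi : 1 ≤ i) (hj : 1 ≤ j) :
    Pf M i j = idx2 M (i-1) (j-1) + Pf M (i-1) j + Pf M i (j-1) - Pf M (i-1) (j-1) := by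
  have h1 := Pf_succ M i j hi
  have h2 := Pf_succ M i (j-1) hi
  have h3 := rowSum_succ M (i-1) j hj
  linarith

-- ---------- A's prefix table ----------

-- characterisation of the partially filled table
def TabInner (M : List (List Int)) (m i u : Int) (ps : Int → Int → Int) : Prop :=
  ∀ a b, ps a b =
    if (1 ≤ a ∧ a ≤ m ∧ 1 ≤ b ∧ b ≤ m) ∧ (a < i ∨ (a = i ∧ b ≤ u)) then Pf M a b else 0

lemma psA_inner (M : List (List Int)) (m i : Int) (_hm : 0 ≤ m) (hi : 1 ≤ i) (hi' : i ≤ m)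
    (ps0 : Int → Int → Int) (h0 : TabInner M m i 0 ps0) :
    ∀ (u : Nat), (u:Int) ≤ m →
      TabInner M m i (u:Int)
        ((PySem.List.pyRange 1 ((u:Int)+1) 1).foldl (fun ps j =>
          fun a b =>
            if a = i ∧ b = j then
              idx2 M (i-1) (j-1) + ps (i-1) j + ps i (j-1) - ps (i-1) (j-1)
            else ps a b) ps0) := by
  intro u
  induction u with
  | zero =>
      intro _
      simpa [PySem.List.pyRange_one_eq_nil (le_refl (1:Int))] using h0
  | succ u ih =>
      intro hu
      have hu1 : ((u+1:Nat):Int) ≤ m := hu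
      have hu' : (u:Int) ≤ m := by push_cast at hu1; omega
      have ihh := ih hu'
      unfold TabInner at ihh
      rw [show (((u+1:Nat):Int)+1 : Int) = ((u:Int)+1)+1 by push_cast; ring,
        PySem.List.pyRange_one_succ_right (by omega : (1:Int) ≤ (u:Int)+1), List.foldl_append]
      simp only [List.foldl_cons, List.foldl_nil]
      set F := (PySem.List.pyRange 1 ((u:Int)+1) 1).foldl (fun ps j =>
          fun a b =>
            if a = i ∧ b = j then
              idx2 M (i-1) (j-1) + ps (i-1) j + ps i (j-1) - ps (i-1) (j-1)
            else ps a b) ps0 with hFdef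
      intro a b
      simp only []
      have hsimp : (u:Int)+1-1 = (u:Int) := by ring
      by_cases hab : a = i ∧ b = (u:Int)+1
      · obtain ⟨hai, hbu⟩ := hab
        have w1 : F (i-1) ((u:Int)+1) = Pf M (i-1) ((u:Int)+1) := by
          rw [ihh]
          split_ifs with h
          · rfl
          · have hz : i - 1 = 0 := by push_cast at hu1; omega
            rw [hz, Pf_zero_left]
        have w2 : F i ((u:Int)) = Pf M i ((u:Int)) := by
          rw [ihh]
          split_ifs with h
          · rfl
          · have hz : (u:Int) = 0 := by push_cast at hu1; omega
            rw [hz, Pf_zero_right]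
        have w3 : F (i-1) ((u:Int)) = Pf M (i-1) ((u:Int)) := by
          rw [ihh]
          split_ifs with h
          · rfl
          · rcases (show i - 1 = 0 ∨ (u:Int) = 0 from by push_cast at hu1; omega) with hz | hz
            · rw [hz, Pf_zero_left]
            · rw [hz, Pf_zero_right]
        rw [if_pos ⟨hai, hbu⟩, hsimp, w1, w2, w3]
        rw [if_pos (show ((1:Int) ≤ a ∧ a ≤ m ∧ 1 ≤ b ∧ b ≤ m) ∧
              (a < i ∨ (a = i ∧ b ≤ ((u+1:Nat):Int))) from by push_cast at hu1 ⊢; omega)]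
        rw [hai, hbu, Pf_rec M i ((u:Int)+1) hi (by omega), hsimp]
      · rw [if_neg hab, ihh a b]
        apply if_congr _ rfl rfl
        push_cast at hab ⊢
        constructor <;> intro <;> omega

lemma psA_outer (M : List (List Int)) (m : Int) (hm : 0 ≤ m) :
    ∀ (t : Nat), (t:Int) ≤ m →
      TabInner M m ((t:Int)+1) 0
        ((PySem.List.pyRange 1 ((t:Int)+1) 1).foldl (fun ps i =>
          (PySem.List.pyRange 1 (m+1) 1).foldl (fun ps j =>
            fun a b =>
              if a = i ∧ b = j then
                idx2 M (i-1) (j-1) + ps (i-1) j + ps i (j-1) - ps (i-1) (j-1)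
              else ps a b) ps) (fun _ _ => 0)) := by
  intro t
  induction t with
  | zero =>
      intro _
      simp only [Nat.cast_zero, zero_add, PySem.List.pyRange_one_eq_nil (le_refl (1:Int)),
        List.foldl_nil]
      intro a b
      rw [if_neg (by omega)]
  | succ t ih =>
      intro ht
      have ht1 : ((t+1:Nat):Int) ≤ m := ht
      have ht' : (t:Int) ≤ m := by push_cast at ht1; omega
      rw [show (((t+1:Nat):Int)+1 : Int) = ((t:Int)+1)+1 by push_cast; ring,
        PySem.List.pyRange_one_succ_right (by omega : (1:Int) ≤ (t:Int)+1), List.foldl_append]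
      simp only [List.foldl_cons, List.foldl_nil]
      have hin := psA_inner M m ((t:Int)+1) hm (by omega) (by push_cast at ht1 ⊢; omega)
        _ (ih ht') m.toNat (by omega)
      rw [show ((m.toNat:Nat):Int) = m from by omega] at hin
      unfold TabInner at hin ⊢
      intro a b
      rw [hin a b]
      apply if_congr _ rfl rfl
      constructor <;> intro <;> omega

lemma psA_spec (M : List (List Int)) (m : Int) (hm : 0 ≤ m) :
    TabInner M m (m+1) 0 (psA M m) := by
  have h := psA_outer M m hm m.toNat (by omega)
  rw [show ((m.toNat:Nat):Int) = m from by omega] at h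
  exact h

lemma psA_eq_Pf (M : List (List Int)) (m : Int) (hm : 0 ≤ m) (a b : Int)
    (ha : 0 ≤ a) (ha' : a ≤ m) (hb : 0 ≤ b) (hb' : b ≤ m) :
    psA M m a b = Pf M a b := by
  have h := psA_spec M m hm
  unfold TabInner at h
  rw [h a b]
  split_ifs with hc
  · rfl
  · have : a = 0 ∨ b = 0 := by omega
    rcases this with rfl | rfl
    · exact (Pf_zero_left M b).symm
    · exact (Pf_zero_right M a).symm

-- ---------- A's row_sums ----------

lemma rsA_partial (ps : Int → Int → Int) (n i : Int) (u : Nat) (k : Int) :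
    ((PySem.List.pyRange 1 ((u:Int)+1) 1).foldl (fun rs j =>
        fun k => if k = j then ps i j - ps (i-n) j else rs k) (fun _ => 0)) k
      = if 1 ≤ k ∧ k ≤ (u:Int) then ps i k - ps (i-n) k else 0 := by
  induction u with
  | zero =>
      simp only [Nat.cast_zero, zero_add,
        PySem.List.pyRange_one_eq_nil (by omega : (1:Int) ≤ 1), List.foldl_nil]
      rw [if_neg (by omega)]
  | succ u ih =>
      rw [show (((u+1:Nat):Int)+1 : Int) = ((u:Int)+1)+1 by push_cast; ring,
        PySem.List.pyRange_one_succ_right (by omega : (1:Int) ≤ (u:Int)+1), List.foldl_append]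
      simp only [List.foldl_cons, List.foldl_nil]
      by_cases hk : k = (u:Int)+1
      · subst hk
        rw [if_pos (show (1:Int) ≤ (u:Int)+1 ∧ (u:Int)+1 ≤ ((u+1:Nat):Int) from by push_cast; omega)]
        simp
      · rw [if_neg hk, ih]
        apply if_congr _ rfl rfl
        push_cast
        constructor <;> intro <;> omega

lemma rsA_spec (ps : Int → Int → Int) (n i m : Int) (hm : 0 ≤ m) (k : Int) :
    rsA ps n i m k = if 1 ≤ k ∧ k ≤ m then ps i k - ps (i-n) k else 0 := by
  unfold rsA
  have hme : m = ((m.toNat : Nat) : Int) := by omega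
  rw [hme]
  exact rsA_partial ps n i m.toNat k

-- ---------- the deque ----------

-- invariant of A's deque after processing columns 1..t (empty allowed before the first step)
def GoodW (rs : Int → Int) (n t : Int) (dq : List Int) : Prop :=
  dq.Pairwise (· < ·) ∧ dq.Pairwise (fun a b => rs b < rs a) ∧
  (∀ d ∈ dq, 1 ≤ d ∧ t - n + 1 ≤ d ∧ d ≤ t) ∧
  (∀ k, 1 ≤ k → t - n + 1 ≤ k → k ≤ t → ∃ d ∈ dq, k ≤ d ∧ rs k ≤ rs d)

-- in a strictly increasing list, everything surviving 'popleft while < c' is ≥ c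
lemma sorted_dropWhile_bound (l : List Int) (c : Int) (hp : l.Pairwise (· < ·)) :
    ∀ d ∈ l.dropWhile (fun x => decide (x < c)), c ≤ d := by
  induction l with
  | nil => simp
  | cons x xs ih =>
      simp only [List.dropWhile_cons]
      split_ifs with hx
      · exact ih (List.pairwise_cons.mp hp).2
      · intro d hd
        rcases List.mem_cons.mp hd with rfl | hdr
        · simpa using hx
        · have h1 := (List.pairwise_cons.mp hp).1 d hdr
          simp only [decide_eq_true_eq] at hx
          omega

-- in a strictly rs-decreasing list the last element has the least rs value
lemma pairwise_last_min (l : List Int) (rs : Int → Int)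
    (hp : l.Pairwise (fun a b => rs b < rs a)) (hl : l ≠ []) :
    ∀ x ∈ l, rs (l.getLast hl) ≤ rs x := by
  obtain ⟨l', a, rfl⟩ : ∃ l' a, l = l' ++ [a] :=
    ⟨l.dropLast, l.getLast hl, (List.dropLast_append_getLast hl).symm⟩
  rw [List.getLast_concat]
  intro x hx
  rcases List.mem_append.mp hx with hx' | hx'
  · have := ((List.pairwise_append.mp hp).2.2) x hx' a (List.mem_singleton.mpr rfl)
    omega
  · rw [List.mem_singleton.mp hx']

lemma GoodW_step (rs : Int → Int) (off : Int → Int) (n t : Int) (dq : List Int)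
    (acc : Option Int) (h : GoodW rs n t dq) (ht : 0 ≤ t) (hn : 1 ≤ n) :
    GoodW rs n (t+1) (dqStep rs off n (dq, acc) (t+1)).1 ∧
    (dqStep rs off n (dq, acc) (t+1)).1 ≠ [] := by
  obtain ⟨hp1, hp2, hb, hdom⟩ := h
  have hstep : (dqStep rs off n (dq, acc) (t+1)).1
      = (((dq.dropWhile (fun d => decide (d < t+1-n+1))).reverse.dropWhile
          (fun d => decide (rs d ≤ rs (t+1)))).reverse) ++ [t+1] := rfl
  rw [hstep]
  set p1 : Int → Bool := fun d => decide (d < t+1-n+1) with hp1def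
  set p2 : Int → Bool := fun d => decide (rs d ≤ rs (t+1)) with hp2def
  set d1 := dq.dropWhile p1 with hd1def
  have hrw : (d1.reverse.dropWhile p2).reverse = d1.rdropWhile p2 := rfl
  rw [hrw]
  set d2 := d1.rdropWhile p2 with hd2def
  -- basic inclusions
  have hd1sub : d1.Sublist dq := List.dropWhile_sublist p1
  have hd2sub : d2.Sublist d1 := (List.rdropWhile_prefix p2 d1).sublist
  have hd2dq : ∀ d ∈ d2, d ∈ dq := fun d hd => hd1sub.subset (hd2sub.subset hd)
  have hd1lb : ∀ d ∈ d1, t+1-n+1 ≤ d := sorted_dropWhile_bound dq (t+1-n+1) hp1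
  have hd1p1 : d1.Pairwise (· < ·) := List.Pairwise.sublist hd1sub hp1
  have hd1p2 : d1.Pairwise (fun a b => rs b < rs a) := List.Pairwise.sublist hd1sub hp2
  have hd2p1 : d2.Pairwise (· < ·) := List.Pairwise.sublist hd2sub hd1p1
  have hd2p2 : d2.Pairwise (fun a b => rs b < rs a) := List.Pairwise.sublist hd2sub hd1p2
  -- everything in d2 has rs-value above rs (t+1)
  have hd2gt : ∀ x ∈ d2, rs (t+1) < rs x := by
    intro x hx
    have hne : d2 ≠ [] := by intro hc; rw [hc] at hx; cases hx
    have hlast : ¬ p2 (d2.getLast hne) = true := List.rdropWhile_last_not p2 d1 hne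
    simp only [hp2def, decide_eq_true_eq] at hlast
    have hmin := pairwise_last_min d2 rs hd2p2 hne x hx
    omega
  -- membership split of d1 along the back pops
  have hsplit1 : ∀ d ∈ d1, d ∈ d2 ∨ rs d ≤ rs (t+1) := by
    intro d hd
    rw [← List.rdropWhile_append_rtakeWhile (p := p2) (l := d1)] at hd
    rcases List.mem_append.mp hd with h' | h'
    · exact Or.inl h'
    · have := List.mem_rtakeWhile_imp h'
      simp only [hp2def, decide_eq_true_eq] at this
      exact Or.inr this
  -- membership of survivors of the popleft
  have hsurv : ∀ d ∈ dq, t+1-n+1 ≤ d → d ∈ d1 := by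
    intro d hd hdb
    rw [← List.takeWhile_append_dropWhile (p := p1) (l := dq)] at hd
    rcases List.mem_append.mp hd with h' | h'
    · have := List.mem_takeWhile_imp h'
      simp only [hp1def, decide_eq_true_eq] at this
      omega
    · exact h'
  refine ⟨⟨?_, ?_, ?_, ?_⟩, by simp⟩
  · rw [List.pairwise_append]
    refine ⟨hd2p1, List.pairwise_singleton _ _, ?_⟩
    intro x hx y hy
    rw [List.mem_singleton.mp hy]
    have := (hb x (hd2dq x hx)).2.2
    omega
  · rw [List.pairwise_append]
    refine ⟨hd2p2, List.pairwise_singleton _ _, ?_⟩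
    intro x hx y hy
    rw [List.mem_singleton.mp hy]
    exact hd2gt x hx
  · intro d hd
    rcases List.mem_append.mp hd with h' | h'
    · obtain ⟨hb1, _, hb3⟩ := hb d (hd2dq d h')
      exact ⟨hb1, hd1lb d (hd2sub.subset h'), by omega⟩
    · rw [List.mem_singleton.mp h']
      omega
  · intro k hk1 hk2 hk3
    by_cases hk : k = t+1
    · exact ⟨t+1, List.mem_append.mpr (Or.inr (List.mem_singleton.mpr rfl)), by omega, by rw [hk]⟩
    · obtain ⟨d, hd, hkd, hrs⟩ := hdom k hk1 (by omega) (by omega)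
      have hd1m : d ∈ d1 := hsurv d hd (by omega)
      rcases hsplit1 d hd1m with h' | h'
      · exact ⟨d, List.mem_append.mpr (Or.inl h'), hkd, hrs⟩
      · exact ⟨t+1, List.mem_append.mpr (Or.inr (List.mem_singleton.mpr rfl)), by omega, by omega⟩

-- the head of the deque is a maximiser of rs over the current window
lemma GoodW_head (rs : Int → Int) (n t : Int) (dq : List Int)
    (h : GoodW rs n t dq) (hne : dq ≠ []) :
    (1 ≤ dq.headD 0 ∧ t - n + 1 ≤ dq.headD 0 ∧ dq.headD 0 ≤ t) ∧
    (∀ k, 1 ≤ k → t - n + 1 ≤ k → k ≤ t → rs k ≤ rs (dq.headD 0)) := by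
  obtain ⟨hp1, hp2, hb, hdom⟩ := h
  cases dq with
  | nil => exact absurd rfl hne
  | cons h0 rest =>
      simp only [List.headD_cons]
      refine ⟨hb h0 List.mem_cons_self, ?_⟩
      intro k hk1 hk2 hk3
      obtain ⟨d, hd, hkd, hrs⟩ := hdom k hk1 hk2 hk3
      rcases List.mem_cons.mp hd with rfl | hdr
      · exact hrs
      · have := (List.pairwise_cons.mp hp2).1 d hdr
        omega

lemma pymaxO_absorb (acc : Option Int) (v x : Int) (h : x ≤ v) :
    pymaxO (pymaxO acc v) x = pymaxO acc v := by
  cases acc <;> simp [pymaxO] <;> omega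

lemma pymaxO_swallow (acc : Option Int) (v x : Int) (h : x ≤ v) :
    pymaxO (pymaxO acc x) v = pymaxO acc v := by
  cases acc <;> simp [pymaxO] <;> omega

lemma foldl_pymaxO_absorb (xs : List Int) (v : Int) (acc : Option Int)
    (hmax : ∀ x ∈ xs, x ≤ v) :
    xs.foldl pymaxO (pymaxO acc v) = pymaxO acc v := by
  induction xs generalizing acc with
  | nil => rfl
  | cons x t ih =>
      simp only [List.foldl_cons]
      rw [pymaxO_absorb acc v x (hmax x List.mem_cons_self)]
      exact ih acc (fun y hy => hmax y (List.mem_cons_of_mem _ hy))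

lemma foldl_pymaxO_eq_of_max (xs : List Int) (v : Int) (acc : Option Int)
    (hv : v ∈ xs) (hmax : ∀ x ∈ xs, x ≤ v) :
    xs.foldl pymaxO acc = pymaxO acc v := by
  induction xs generalizing acc with
  | nil => cases hv
  | cons x t ih =>
      simp only [List.foldl_cons]
      by_cases hvt : v ∈ t
      · rw [ih (pymaxO acc x) hvt (fun y hy => hmax y (List.mem_cons_of_mem _ hy)),
          pymaxO_swallow acc v x (hmax x List.mem_cons_self)]
      · have hvx : v = x := by
          rcases List.mem_cons.mp hv with h | h
          · exact h
          · exact absurd h hvt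
        subst hvx
        exact foldl_pymaxO_absorb t v acc (fun y hy => hmax y (List.mem_cons_of_mem _ hy))

-- A's whole inner (deque) loop computes the running max over the flat candidate list
def dqCands (rs : Int → Int) (off : Int → Int) (n m : Int) : List Int :=
  (PySem.List.pyRange n (m+1) 1).flatMap (fun j =>
    (PySem.List.pyRange (j-n+1) (j+1) 1).map (fun k => rs k - off j))

lemma dq_aux (rs off : Int → Int) (n : Int) (a0 : Option Int) (hn : 1 ≤ n) :
    ∀ (u : Nat),
      GoodW rs n (u:Int)
          (((PySem.List.pyRange 1 ((u:Int)+1) 1).foldl (dqStep rs off n) ([], a0)).1) ∧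
      ((PySem.List.pyRange 1 ((u:Int)+1) 1).foldl (dqStep rs off n) ([], a0)).2
        = ((PySem.List.pyRange n ((u:Int)+1) 1).flatMap (fun j =>
            (PySem.List.pyRange (j-n+1) (j+1) 1).map (fun k => rs k - off j))).foldl pymaxO a0 := by
  intro u
  induction u with
  | zero =>
      simp only [Nat.cast_zero, zero_add,
        PySem.List.pyRange_one_eq_nil (le_refl (1:Int)), List.foldl_nil]
      refine ⟨⟨List.Pairwise.nil, List.Pairwise.nil, by simp, ?_⟩, ?_⟩
      · intro k hk1 hk2 hk3; omega
      · rw [PySem.List.pyRange_one_eq_nil (by omega : (1:Int) ≤ n)]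
        simp
  | succ u ih =>
      obtain ⟨ihG, ihacc⟩ := ih
      rw [show ((u+1:Nat):Int) = (u:Int)+1 from by push_cast; ring,
        PySem.List.pyRange_one_succ_right (by omega : (1:Int) ≤ (u:Int)+1), List.foldl_append]
      simp only [List.foldl_cons, List.foldl_nil]
      set st := (PySem.List.pyRange 1 ((u:Int)+1) 1).foldl (dqStep rs off n) ([], a0) with hst
      have hGW := GoodW_step rs off n (u:Int) st.1 st.2 ihG (by omega) hn
      rw [Prod.mk.eta] at hGW
      have hacc : (dqStep rs off n st ((u:Int)+1)).2
          = if n ≤ (u:Int)+1 then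
              pymaxO st.2 (rs (((dqStep rs off n st ((u:Int)+1)).1).headD 0) - off ((u:Int)+1))
            else st.2 := rfl
      refine ⟨hGW.1, ?_⟩
      by_cases hcase : n ≤ (u:Int)+1
      · rw [PySem.List.pyRange_one_succ_right hcase, List.flatMap_append, List.foldl_append,
          ← ihacc]
        simp only [List.flatMap_cons, List.flatMap_nil, List.append_nil]
        rw [hacc, if_pos hcase]
        set DQ := (dqStep rs off n st ((u:Int)+1)).1 with hDQ
        have hh := GoodW_head rs n ((u:Int)+1) DQ hGW.1 hGW.2
        rw [foldl_pymaxO_eq_of_max _ (rs (DQ.headD 0) - off ((u:Int)+1)) st.2 ?_ ?_]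
        · exact List.mem_map.mpr ⟨DQ.headD 0,
            PySem.List.mem_pyRange_one.mpr ⟨by omega, by omega⟩, rfl⟩
        · intro x hx
          obtain ⟨k, hk, rfl⟩ := List.mem_map.mp hx
          have hk' := PySem.List.mem_pyRange_one.mp hk
          have := hh.2 k (by omega) (by omega) (by omega)
          omega
      · rw [hacc, if_neg hcase, ihacc,
          PySem.List.pyRange_one_eq_nil (by omega : (u:Int)+1+1 ≤ n),
          PySem.List.pyRange_one_eq_nil (by omega : (u:Int)+1 ≤ n)]

lemma dq_main (rs : Int → Int) (off : Int → Int) (n m : Int) (a0 : Option Int)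
    (hn : 1 ≤ n) (hm : n ≤ m) :
    ((PySem.List.pyRange 1 (m+1) 1).foldl (dqStep rs off n) ([], a0)).2
      = (dqCands rs off n m).foldl pymaxO a0 := by
  have h := (dq_aux rs off n a0 hn m.toNat).2
  rw [show ((m.toNat:Nat):Int) = m from by omega] at h
  exact h

-- ---------- B's prefix table ----------

def goodRow (M : List (List Int)) (m i : Int) : List Int :=
  (PySem.List.pyRange 0 (m+1) 1).map (fun b => Pf M i b)

def goodPref (M : List (List Int)) (m : Int) : Nat → List (List Int)
  | 0 => [goodRow M m 0]
  | (u+1) => goodPref M m u ++ [goodRow M m (u+1)]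

lemma pyGet?_getD {α : Type} (xs : List α) (i : Int) (d : α) :
    (PySem.List.pyGet? xs i).getD d = PySem.List.pyGetD xs i d := rfl

-- running row sum read off the raw row
def rsumF (r : List Int) (u : Int) : Int :=
  ((PySem.List.pyRange 0 u 1).map (fun b => (PySem.List.pyGet? r b).getD 0)).sum

lemma rsumF_succ (r : List Int) (u : Int) (h : 0 ≤ u) :
    rsumF r (u+1) = rsumF r u + (PySem.List.pyGet? r u).getD 0 := by
  unfold rsumF
  rw [PySem.List.pyRange_one_succ_right h]
  simp

lemma rowFold_partial (prev r : List Int) : ∀ (u : Nat),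
    ((PySem.List.pyRange 0 (u:Int) 1).foldl (fun (p : List Int × Int) j =>
        let s := p.2 + ((PySem.List.pyGet? r j).getD 0)
        (p.1 ++ [s + ((PySem.List.pyGet? prev (j+1)).getD 0)], s)) ([0], 0))
      = (0 :: (PySem.List.pyRange 0 (u:Int) 1).map (fun j =>
          rsumF r (j+1) + ((PySem.List.pyGet? prev (j+1)).getD 0)), rsumF r (u:Int)) := by
  intro u
  induction u with
  | zero =>
      simp only [Nat.cast_zero, PySem.List.pyRange_one_eq_nil (le_refl (0:Int)), List.foldl_nil,
        List.map_nil]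
      unfold rsumF
      simp [PySem.List.pyRange_one_eq_nil (le_refl (0:Int))]
  | succ u ih =>
      rw [show ((u+1:Nat):Int) = (u:Int)+1 from by push_cast; ring,
        PySem.List.pyRange_one_succ_right (by omega : (0:Int) ≤ (u:Int)), List.foldl_append,
        List.map_append, ih]
      simp only [List.foldl_cons, List.foldl_nil, List.map_cons, List.map_nil]
      rw [← rsumF_succ r (u:Int) (by omega)]
      simp

lemma rowFold_spec (m : Int) (hm : 0 ≤ m) (prev r : List Int) :
    rowFold m prev r
      = (0 :: (PySem.List.pyRange 0 m 1).map (fun j =>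
          rsumF r (j+1) + ((PySem.List.pyGet? prev (j+1)).getD 0)), rsumF r m) := by
  have h := rowFold_partial prev r m.toNat
  rw [show ((m.toNat:Nat):Int) = m from by omega] at h
  exact h

-- shifting the range by one
lemma map_range_shift (f : Int → Int) (m : Int) :
    (PySem.List.pyRange 0 m 1).map (fun j => f (j+1)) = (PySem.List.pyRange 1 (m+1) 1).map f := by
  rw [PySem.List.pyRange_one 0 m, PySem.List.pyRange_one 1 (m+1), List.map_map, List.map_map]
  rw [show (m+1-1 : Int) = m - 0 from by ring]
  apply List.map_congr_left
  intro k _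
  simp only [Function.comp_apply]
  ring_nf

lemma rowFold_good (M : List (List Int)) (t : Nat) (ht : t < M.length) :
    (rowFold (M.length : Int) (goodRow M (M.length : Int) (t:Int)) M[t]).1
      = goodRow M (M.length : Int) ((t:Int)+1) := by
  set m : Int := (M.length : Int) with hmdef
  have hm : 0 ≤ m := by positivity
  rw [rowFold_spec m hm]
  simp only []
  have hrsum : ∀ x : Int, rsumF (M[t]) x = rowSum M (t:Int) x := by
    intro x
    unfold rsumF rowSum idx2
    apply congrArg
    apply List.map_congr_left
    intro b _
    have hMt : (PySem.List.pyGet? M (t:Int)).getD [] = M[t] := by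
      rw [pyGet?_getD, PySem.List.pyGetD_eq_getElem M [] (by omega) (by exact_mod_cast ht)]
      simp
    rw [hMt]
  have hprev : ∀ j, j ∈ PySem.List.pyRange 0 m 1 →
      ((PySem.List.pyGet? (goodRow M m (t:Int)) (j+1)).getD 0) = Pf M (t:Int) (j+1) := by
    intro j hj
    obtain ⟨hj0, hjm⟩ := PySem.List.mem_pyRange_one.mp hj
    unfold goodRow
    rw [pyGet?_getD]
    rw [show (m+1 : Int) = ((m.toNat+1 : Nat):Int) from by omega,
      show (j+1 : Int) = (((j+1).toNat : Nat):Int) from by omega]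
    exact PySem.List.pyGetD_map_pyRange (fun b => Pf M (t:Int) b) (m.toNat+1) (j+1).toNat 0
      (by omega)
  have hentry : ∀ j ∈ PySem.List.pyRange 0 m 1,
      rsumF (M[t]) (j+1) + ((PySem.List.pyGet? (goodRow M m (t:Int)) (j+1)).getD 0)
        = Pf M ((t:Int)+1) (j+1) := by
    intro j hj
    rw [hrsum (j+1), hprev j hj]
    have := Pf_succ M ((t:Int)+1) (j+1) (by omega)
    rw [show ((t:Int)+1-1 : Int) = (t:Int) from by ring] at this
    omega
  rw [List.map_congr_left hentry, map_range_shift (fun b => Pf M ((t:Int)+1) b) m]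
  unfold goodRow
  rw [PySem.List.pyRange_one_cons (by omega : (0:Int) < m+1), List.map_cons, Pf_zero_right]
  norm_num

lemma goodPref_getLast (M : List (List Int)) (m : Int) (u : Nat) :
    ((goodPref M m u).getLast?).getD [] = goodRow M m (u:Int) := by
  cases u with
  | zero => simp [goodPref]
  | succ u => simp [goodPref]

lemma pref_main (M : List (List Int)) : ∀ (rows : List (List Int)) (t : Nat),
    rows = M.drop t →
    rows.foldl (fun pref r =>
        pref ++ [(rowFold (M.length : Int) ((pref.getLast?).getD []) r).1])
      (goodPref M (M.length : Int) t)
      = goodPref M (M.length : Int) (t + rows.length) := by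
  intro rows
  induction rows with
  | nil => intro t _; simp
  | cons r rest ih =>
      intro t hdrop
      have hlen : t < M.length := by
        have := congrArg List.length hdrop
        simp [List.length_drop] at this
        omega
      have hr : r = M[t] := by
        have h1 : (M.drop t).head? = M[t]? := List.head?_drop
        rw [← hdrop, List.getElem?_eq_getElem hlen] at h1
        exact Option.some.inj h1
      have hrest : rest = M.drop (t+1) := by
        rw [← List.tail_drop, ← hdrop]
        rfl
      simp only [List.foldl_cons]
      rw [goodPref_getLast, hr, rowFold_good M t hlen,
        show ((t:Int)+1) = ((t+1:Nat):Int) from by push_cast; ring]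
      have hstep : goodPref M (M.length : Int) t ++ [goodRow M (M.length : Int) ((t+1:Nat):Int)]
          = goodPref M (M.length : Int) (t+1) := rfl
      rw [hstep, ih (t+1) hrest]
      have harith : t + (M[t] :: rest).length = t + 1 + rest.length := by
        simp only [List.length_cons]
        omega
      rw [harith]

lemma pref_build (M : List (List Int)) :
    M.foldl (fun pref r => pref ++ [(rowFold (M.length : Int) ((pref.getLast?).getD []) r).1])
        [List.replicate (M.length + 1) 0]
      = goodPref M (M.length : Int) M.length := by
  have hinit : [List.replicate (M.length + 1) 0] = goodPref M (M.length : Int) 0 := by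
    simp only [goodPref]
    congr 1
    unfold goodRow
    rw [List.map_congr_left (fun b _ => Pf_zero_left M b)]
    rw [List.map_const']
    congr 1
    rw [PySem.List.length_pyRange_one]
    omega
  rw [hinit]
  have h := pref_main M M 0 rfl
  simpa using h

lemma goodPref_eq_map (M : List (List Int)) (m : Int) (u : Nat) :
    goodPref M m u = (List.range (u+1)).map (fun (i : Nat) => goodRow M m (i:Int)) := by
  induction u with
  | zero => simp [goodPref]
  | succ u ih =>
      show goodPref M m u ++ [goodRow M m ((u+1:Nat):Int)] = _
      rw [ih, show List.range (u+1+1) = List.range (u+1) ++ [u+1] from List.range_succ,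
        List.map_append]
      simp

lemma idx2_goodPref (M : List (List Int)) (m : Int) (u : Nat) (a b : Int)
    (ha : 0 ≤ a) (ha' : a ≤ (u : Int)) (hb : 0 ≤ b) (hb' : b ≤ m) (hm : 0 ≤ m) :
    idx2 (goodPref M m u) a b = Pf M a b := by
  unfold idx2
  rw [pyGet?_getD, pyGet?_getD, goodPref_eq_map]
  rw [show (a : Int) = ((a.toNat : Nat):Int) from by omega, PySem.List.pyGetD_natCast]
  rw [PySem.List.getD_map_range (fun (i : Nat) => goodRow M m (i:Int)) (u+1) a.toNat [] (by omega)]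
  unfold goodRow
  rw [show (m+1 : Int) = ((m.toNat+1 : Nat):Int) from by omega,
    show (b : Int) = ((b.toNat : Nat):Int) from by omega]
  exact PySem.List.pyGetD_map_pyRange (fun x => Pf M ((a.toNat : Nat):Int) x) (m.toNat+1) b.toNat 0
    (by omega)

-- ---------- the common canonical form of the per-n fold ----------

-- the band's column-prefix sums, in terms of the mathematical prefix sum
def PfD (M : List (List Int)) (n i k : Int) : Int := Pf M i k - Pf M (i-n) k

-- the value both per-(i,j) steps add to the running maximum
def sCanon (M : List (List Int)) (n i j : Int) : Int :=
  (PySem.List.max? ((PySem.List.pyRange (j-n+1) (j+1) 1).map (PfD M n i)) (fun x => x)).getD 0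
    - PfD M n i (j-n)

def canonFold (M : List (List Int)) (m n : Int) : Option Int :=
  (PySem.List.pyRange n (m+1) 1).foldl (fun acc i =>
    (PySem.List.pyRange n (m+1) 1).foldl (fun acc j => pymaxO acc (sCanon M n i j)) acc) none

lemma bmax_eq_pymaxO (b : Option Int) (s : Int) : bmax b s = pymaxO b s := by
  cases b with
  | none => rfl
  | some v =>
      simp only [bmax, pymaxO, max_def]
      split_ifs <;> simp <;> omega

-- a window fold of pymaxO over shifted values collapses to one pymaxO of the slice max
lemma window_fold (rs : Int → Int) (c : Int) (W : List Int) (hW : W ≠ []) (acc : Option Int) :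
    (W.map (fun k => rs k - c)).foldl pymaxO acc
      = pymaxO acc ((PySem.List.max? (W.map rs) (fun x => x)).getD 0 - c) := by
  cases W with
  | nil => exact absurd rfl hW
  | cons h t =>
      rw [List.map_cons, List.map_cons, PySem.List.max?_id_cons, Option.getD_some]
      set Mx := (t.map rs).foldl max (rs h) with hMx
      apply foldl_pymaxO_eq_of_max
      · rcases PySem.List.foldl_max_mem (t.map rs) (rs h) with hc | hc
        · rw [hMx, hc]
          exact List.mem_cons_self
        · obtain ⟨k, hk, hrk⟩ := List.mem_map.mp hc
          rw [show Mx - c = rs k - c from by rw [hMx, ← hrk]]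
          exact List.mem_cons_of_mem _ (List.mem_map.mpr ⟨k, hk, rfl⟩)
      · intro x hx
        rcases List.mem_cons.mp hx with rfl | hx'
        · have := (PySem.List.le_foldl_max (t.map rs) (rs h)).1
          omega
        · obtain ⟨k, hk, rfl⟩ := List.mem_map.mp hx'
          have := (PySem.List.le_foldl_max (t.map rs) (rs h)).2 (rs k)
            (List.mem_map.mpr ⟨k, hk, rfl⟩)
          omega

-- a slice of a comprehension over range(0, N) is the comprehension over the sub-range
lemma slice_map_range (f : Int → Int) (N a b : Int)
    (h0 : 0 ≤ a) (hab : a ≤ b) (hb : b ≤ N) :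
    PySem.List.slice ((PySem.List.pyRange 0 N 1).map f) (some a) (some b)
      = (PySem.List.pyRange a b 1).map f := by
  rw [PySem.List.slice_toNat _ h0 (by omega)]
  rw [PySem.List.pyRange_one_append 0 b N (by omega) hb,
    PySem.List.pyRange_one_append 0 a b h0 hab,
    List.map_append, List.map_append, List.append_assoc]
  rw [List.drop_left' (by rw [List.length_map, PySem.List.length_pyRange_one]; omega)]
  rw [List.take_left' (by rw [List.length_map, PySem.List.length_pyRange_one]; omega)]

-- ---------- the two per-n folds equal the canonical fold ----------

lemma A_side (M : List (List Int)) (m n : Int) (hn1 : 1 ≤ n) (hn2 : n ≤ m) :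
    (PySem.List.pyRange n (m+1) 1).foldl (fun acc i =>
        ((PySem.List.pyRange 1 (m+1) 1).foldl
          (dqStep (rsA (psA M m) n i m)
            (fun j => psA M m i (j-n) - psA M m (i-n) (j-n)) n)
          ([], acc)).2) none
      = canonFold M m n := by
  unfold canonFold
  apply PySem.List.foldl_congr_mem
  intro acc i hi
  obtain ⟨hi1, hi2⟩ := PySem.List.mem_pyRange_one.mp hi
  have hmnn : (0:Int) ≤ m := by omega
  rw [dq_main _ _ n m acc hn1 hn2]
  unfold dqCands
  rw [List.foldl_flatMap]
  apply PySem.List.foldl_congr_mem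
  intro acc2 j hj
  obtain ⟨hj1, hj2⟩ := PySem.List.mem_pyRange_one.mp hj
  have hWne : PySem.List.pyRange (j-n+1) (j+1) 1 ≠ [] := by
    rw [PySem.List.pyRange_one_cons (by omega : j-n+1 < j+1)]
    simp
  have hmapeq : (PySem.List.pyRange (j-n+1) (j+1) 1).map
        (fun k => rsA (psA M m) n i m k - (psA M m i (j-n) - psA M m (i-n) (j-n)))
      = (PySem.List.pyRange (j-n+1) (j+1) 1).map (fun k => PfD M n i k - PfD M n i (j-n)) := by
    apply List.map_congr_left
    intro k hk
    obtain ⟨hk1, hk2⟩ := PySem.List.mem_pyRange_one.mp hk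
    rw [rsA_spec _ n i m hmnn k, if_pos ⟨by omega, by omega⟩]
    unfold PfD
    rw [psA_eq_Pf M m hmnn i k (by omega) (by omega) (by omega) (by omega),
      psA_eq_Pf M m hmnn (i-n) k (by omega) (by omega) (by omega) (by omega),
      psA_eq_Pf M m hmnn i (j-n) (by omega) (by omega) (by omega) (by omega),
      psA_eq_Pf M m hmnn (i-n) (j-n) (by omega) (by omega) (by omega) (by omega)]
  show ((PySem.List.pyRange (j-n+1) (j+1) 1).map
      (fun k => rsA (psA M m) n i m k
        - (psA M m i (j-n) - psA M m (i-n) (j-n)))).foldl pymaxO acc2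
    = pymaxO acc2 (sCanon M n i j)
  rw [hmapeq]
  exact window_fold (PfD M n i) (PfD M n i (j-n)) _ hWne acc2

lemma B_side (M : List (List Int)) (m n : Int) (hm : m = (M.length:Int))
    (hn1 : 1 ≤ n) (_hn2 : n ≤ m) :
    (PySem.List.pyRange n (m+1) 1).foldl (fun b i =>
        (PySem.List.pyRange n (m+1) 1).foldl (fun b j =>
          bmax b
            ((PySem.List.max? (PySem.List.slice
                ((PySem.List.pyRange 0 (m+1) 1).map (fun c =>
                  idx2 (goodPref M m M.length) i c - idx2 (goodPref M m M.length) (i-n) c))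
                (some (j-n+1)) (some (j+1))) (fun x => x)).getD 0
              - (PySem.List.pyGet? ((PySem.List.pyRange 0 (m+1) 1).map (fun c =>
                  idx2 (goodPref M m M.length) i c - idx2 (goodPref M m M.length) (i-n) c))
                  (j-n)).getD 0)) b) none
      = canonFold M m n := by
  unfold canonFold
  apply PySem.List.foldl_congr_mem
  intro acc i hi
  obtain ⟨hi1, hi2⟩ := PySem.List.mem_pyRange_one.mp hi
  have hband : (PySem.List.pyRange 0 (m+1) 1).map (fun c =>
        idx2 (goodPref M m M.length) i c - idx2 (goodPref M m M.length) (i-n) c)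
      = (PySem.List.pyRange 0 (m+1) 1).map (PfD M n i) := by
    apply List.map_congr_left
    intro c hc
    obtain ⟨hc1, hc2⟩ := PySem.List.mem_pyRange_one.mp hc
    unfold PfD
    rw [idx2_goodPref M m M.length i c (by omega) (by omega) (by omega) (by omega) (by omega),
      idx2_goodPref M m M.length (i-n) c (by omega) (by omega) (by omega) (by omega) (by omega)]
  show (PySem.List.pyRange n (m+1) 1).foldl (fun b j =>
      bmax b
        ((PySem.List.max? (PySem.List.slice
            ((PySem.List.pyRange 0 (m+1) 1).map (fun c =>
              idx2 (goodPref M m M.length) i c - idx2 (goodPref M m M.length) (i-n) c))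
            (some (j-n+1)) (some (j+1))) (fun x => x)).getD 0
          - (PySem.List.pyGet? ((PySem.List.pyRange 0 (m+1) 1).map (fun c =>
              idx2 (goodPref M m M.length) i c - idx2 (goodPref M m M.length) (i-n) c))
              (j-n)).getD 0)) acc
    = (PySem.List.pyRange n (m+1) 1).foldl (fun acc j => pymaxO acc (sCanon M n i j)) acc
  rw [hband]
  apply PySem.List.foldl_congr_mem
  intro acc2 j hj
  obtain ⟨hj1, hj2⟩ := PySem.List.mem_pyRange_one.mp hj
  have hslice : PySem.List.slice ((PySem.List.pyRange 0 (m+1) 1).map (PfD M n i))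
        (some (j-n+1)) (some (j+1))
      = (PySem.List.pyRange (j-n+1) (j+1) 1).map (PfD M n i) :=
    slice_map_range (PfD M n i) (m+1) (j-n+1) (j+1) (by omega) (by omega) (by omega)
  have hget : (PySem.List.pyGet? ((PySem.List.pyRange 0 (m+1) 1).map (PfD M n i)) (j-n)).getD 0
      = PfD M n i (j-n) := by
    rw [pyGet?_getD]
    exact PySem.List.pyGetD_map_pyRange_of_nonneg (PfD M n i) (m+1) (j-n) 0 (by omega) (by omega)
  show bmax acc2
      ((PySem.List.max? (PySem.List.slice ((PySem.List.pyRange 0 (m+1) 1).map (PfD M n i))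
          (some (j-n+1)) (some (j+1))) (fun x => x)).getD 0
        - (PySem.List.pyGet? ((PySem.List.pyRange 0 (m+1) 1).map (PfD M n i)) (j-n)).getD 0)
    = pymaxO acc2 (sCanon M n i j)
  rw [hslice, hget, bmax_eq_pymaxO]
  rfl

-- ===== VERDICT (by name: the statement is the Claim_ definition above) =====
theorem max_submatrix_sums_spec : Claim_equal_max_submatrix_sums := by
  intro matrix _hDom _hPre
  unfold Spec_max_submatrix_sums
  show max_submatrix_sums matrix = max_submatrix_sums_alt matrix
  simp only [max_submatrix_sums, max_submatrix_sums_alt]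
  set m : Int := (matrix.length : Int) with hmdef
  by_cases hm0 : m = 0
  · rw [if_pos hm0, if_pos hm0]
  · rw [if_neg hm0, if_neg hm0]
    have hmnn : (0:Int) ≤ m := by rw [hmdef]; positivity
    have hpref : matrix.foldl (fun pref r => pref ++ [(rowFold m ((pref.getLast?).getD []) r).1])
          [List.replicate (m.toNat + 1) 0] = goodPref matrix m matrix.length := by
      rw [show m.toNat + 1 = matrix.length + 1 from by rw [hmdef]; omega]
      exact pref_build matrix
    rw [hpref, PySem.List.foldl_append_singleton_eq_map, PySem.List.foldl_append_singleton_eq_map]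
    simp only [List.nil_append]
    apply List.map_congr_left
    intro n hn
    obtain ⟨hn1, hn2⟩ := PySem.List.mem_pyRange_one.mp hn
    have h := (A_side matrix m n hn1 (by omega)).trans
      (B_side matrix m n hmdef hn1 (by omega)).symm
    exact congrArg (fun o : Option Int => o.getD 0) h
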